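-- pv_equiv track=rewrite | github.com/choiyunh/WALK-A-DAY | Self/SKHynix/2.py | solution
-- ===== SOURCE A (Python) =====
-- from collections import defaultdict
--
-- def solution(inp_str):
--     answer = set()
--     special = "~!@#$%^&*"
--     checkGroup = set()
--     checkNum = defaultdict(int)
--     count = 0
--     length = len(inp_str)
--
--     if not (8 <= length <= 15):
--         answer.add(1)
--     for i in range(length):
--         checkNum[inp_str[i]] += 1
--         if 65 <= ord(inp_str[i]) <= 90:
--             checkGroup.add(0)
--         elif 97 <= ord(inp_str[i]) <= 122:
--             checkGroup.add(1)
--         elif inp_str[i].isdigit():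
--             checkGroup.add(2)
--         elif inp_str[i] in special:
--             checkGroup.add(3)
--         else:
--             answer.add(2)
--
--         if i < length - 1 and inp_str[i] == inp_str[i + 1]:
--             count += 1
--         else:
--             count = 0
--         if count >= 3:
--             answer.add(4)
--
--     if len(checkGroup) < 3:
--         answer.add(3)
--     for v in checkNum.values():
--         if v >= 5:
--             answer.add(5)
--     if len(answer) == 0:
--         return [0]
--     return sorted(list(answer))
-- ===== SOURCE B (Python) =====
-- from collections import Counter
--
-- _SPECIAL = "~!@#$%^&*"
--
--
-- def _group(c):
--     o = ord(c)
--     if 65 <= o <= 90: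
--         return 0
--     if 97 <= o <= 122:
--         return 1
--     if c.isdigit():
--         return 2
--     if c in _SPECIAL:
--         return 3
--     return None
--
--
-- def _has_run_of_4(s):
--     # run-length scan with two indices (groupby style)
--     found = False
--     i, n = 0, len(s)
--     while i < n:
--         j = i
--         while j < n and s[j] == s[i]:
--             j += 1
--         if j - i >= 4:
--             found = True
--         i = j
--     return found
--
--
-- def solution(inp_str):
--     n = len(inp_str)
--     codes = []
--     if not (8 <= n <= 15):
--         codes.append(1)
--     if any(_group(c) is None for c in inp_str):
--         codes.append(2)
--     groups = {g for g in map(_group, inp_str) if g is not None}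
--     if len(groups) < 3:
--         codes.append(3)
--     if _has_run_of_4(inp_str):
--         codes.append(4)
--     if any(v >= 5 for v in Counter(inp_str).values()):
--         codes.append(5)
--     return codes if codes else [0]
-- ===== Notes on version B (the rewrite author's own statement) =====
-- stated objective: simpler
-- what changed: Replaces A's single fused index loop (shared count/answer/checkNum/checkGroup state with lookahead) by five independent rule checks: a length test, an any() over a per-char classifier, a set comprehension of groups, a two-index run-length scan, and a Counter pass; codes are emitted already in ascending order so no final sort is needed.
import Mathlib
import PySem

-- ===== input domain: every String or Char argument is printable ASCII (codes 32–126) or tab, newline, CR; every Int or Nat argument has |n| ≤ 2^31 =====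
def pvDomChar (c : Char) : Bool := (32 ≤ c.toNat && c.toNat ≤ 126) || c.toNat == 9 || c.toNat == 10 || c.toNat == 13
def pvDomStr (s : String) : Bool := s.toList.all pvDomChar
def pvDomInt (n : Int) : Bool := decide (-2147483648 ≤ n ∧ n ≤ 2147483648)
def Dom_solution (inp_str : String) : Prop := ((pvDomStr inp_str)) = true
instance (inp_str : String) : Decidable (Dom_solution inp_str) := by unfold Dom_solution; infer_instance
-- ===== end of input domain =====

-- B is a different decomposition of A (five independent rule passes instead of one fused
-- stateful loop); equivalence is proved on all inputs (A is total).

-- ===== PORT A =====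
-- A's fused for-loop over i in range(length): ported as structural recursion over the char
-- list with one-char lookahead (inp_str[i+1] is the head of the tail), carrying the same
-- four pieces of state (checkNum, checkGroup, answer, count).
def solLoopA (cs : List Char) (checkNum : PySem.Dict Char Int) (checkGroup : PySem.Set Int)
    (answer : PySem.Set Int) (count : Int) :
    PySem.Dict Char Int × PySem.Set Int × PySem.Set Int :=
  match cs with
  | [] => (checkNum, checkGroup, answer)
  | c :: rest =>
    let checkNum := checkNum.modify c 0 (· + 1)
    -- the elif chain: exactly one of checkGroup.add(k) / answer.add(2) happens
    let p : PySem.Set Int × PySem.Set Int :=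
      if 65 ≤ c.toNat ∧ c.toNat ≤ 90 then (PySem.Set.add checkGroup 0, answer)
      else if 97 ≤ c.toNat ∧ c.toNat ≤ 122 then (PySem.Set.add checkGroup 1, answer)
      else if PySem.Chars.isdigit c then (PySem.Set.add checkGroup 2, answer)
      else if ("~!@#$%^&*".toList.contains c) then (PySem.Set.add checkGroup 3, answer)
      else (checkGroup, PySem.Set.add answer 2)
    let checkGroup := p.1
    let answer := p.2
    -- "i < length - 1 and inp_str[i] == inp_str[i+1]"  ⟺  the tail starts with the same char
    let count := if (match rest with | c' :: _ => c == c' | [] => false) then count + 1 else 0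
    let answer := if count ≥ 3 then PySem.Set.add answer 4 else answer
    solLoopA rest checkNum checkGroup answer count

def solution (inp_str : String) : List Int :=
  let cs := inp_str.toList
  let answer0 : PySem.Set Int :=
    if ¬ (8 ≤ cs.length ∧ cs.length ≤ 15) then PySem.Set.add PySem.Set.empty 1 else PySem.Set.empty
  let r := solLoopA cs PySem.Dict.empty PySem.Set.empty answer0 0
  let answer1 : PySem.Set Int :=
    if PySem.Set.len r.2.1 < 3 then PySem.Set.add r.2.2 3 else r.2.2
  let answer2 : PySem.Set Int :=
    r.1.values.foldl (fun a v => if v ≥ 5 then PySem.Set.add a 5 else a) answer1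
  if PySem.Set.len answer2 = 0 then [0] else PySem.List.sorted answer2 (fun x => x)

-- ===== PORT B =====
-- Source B's _group(c): the category of a character, None if it is in no category.
def groupOf (c : Char) : Option Int :=
  if 65 ≤ c.toNat ∧ c.toNat ≤ 90 then some 0
  else if 97 ≤ c.toNat ∧ c.toNat ≤ 122 then some 1
  else if PySem.Chars.isdigit c then some 2
  else if ("~!@#$%^&*".toList.contains c) then some 3
  else none

-- Source B's _has_run_of_4: the inner "while j < n and s[j] == s[i]" is the takeWhile of the
-- tail; the outer loop jumps to j (a drop), carrying the `found` flag.
def runScanB (cs : List Char) (found : Bool) : Bool :=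
  match cs with
  | [] => found
  | c :: rest =>
    let same := rest.takeWhile (· == c)
    runScanB (rest.drop same.length) (found || decide (1 + same.length ≥ 4))
termination_by cs.length
decreasing_by
  simp only [List.length_cons]
  have : (List.drop (rest.takeWhile (· == c)).length rest).length
      = rest.length - (rest.takeWhile (· == c)).length := List.length_drop
  omega

def solution_alt (inp_str : String) : List Int :=
  let cs := inp_str.toList
  let n := cs.length
  let codes : List Int := []
  let codes := if ¬ (8 ≤ n ∧ n ≤ 15) then codes ++ [1] else codes
  let codes := if cs.any (fun c => groupOf c == none) then codes ++ [2] else codes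
  -- {g for g in map(_group, inp_str) if g is not None}
  let groups : PySem.Set Int := PySem.Set.ofList (cs.filterMap groupOf)
  let codes := if PySem.Set.len groups < 3 then codes ++ [3] else codes
  let codes := if runScanB cs false then codes ++ [4] else codes
  let codes := if (PySem.Dict.counter cs).values.any (fun v => v ≥ 5) then codes ++ [5] else codes
  if codes = [] then [0] else codes

-- ===== PRECONDITION & SPEC =====
def Spec_solution (inp_str : String) (out : List Int) : Prop := out = solution_alt inp_str
instance (inp_str : String) (out : List Int) : Decidable (Spec_solution inp_str out) := by unfold Spec_solution; infer_instance

-- ===== CLAIM (what is proved, stated in full; the proofs are below) =====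
def Claim_equal_solution : Prop := ∀ (inp_str : String), Dom_solution inp_str → Spec_solution inp_str (solution inp_str)

-- ===== LEMMAS AND PROOFS =====

-- A's elif chain, written through B's classifier groupOf.
theorem chainA (c : Char) (g a : PySem.Set Int) :
    (if 65 ≤ c.toNat ∧ c.toNat ≤ 90 then (PySem.Set.add g 0, a)
      else if 97 ≤ c.toNat ∧ c.toNat ≤ 122 then (PySem.Set.add g 1, a)
      else if PySem.Chars.isdigit c then (PySem.Set.add g 2, a)
      else if ("~!@#$%^&*".toList.contains c) then (PySem.Set.add g 3, a)
      else (g, PySem.Set.add a 2)) =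
    (match groupOf c with
      | some k => (PySem.Set.add g k, a)
      | none => (g, PySem.Set.add a 2)) := by
  unfold groupOf; split_ifs <;> rfl

-- A's count/"add 4" logic isolated as a Bool (the same recursion as solLoopA's count state).
def aRun (cs : List Char) (count : Int) : Bool :=
  match cs with
  | [] => false
  | c :: rest =>
    let count := if (match rest with | c' :: _ => c == c' | [] => false) then count + 1 else 0
    (decide (count ≥ 3)) || aRun rest count

theorem solLoopA_counts (cs : List Char) :
    ∀ d g a cnt, (solLoopA cs d g a cnt).1 = cs.foldl (fun d c => d.modify c 0 (· + 1)) d := by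
  induction cs with
  | nil => intro d g a cnt; rfl
  | cons c rest ih =>
    intro d g a cnt
    simp only [solLoopA, List.foldl_cons]
    exact ih _ _ _ _

theorem solLoopA_groups (cs : List Char) :
    ∀ d g a cnt, (solLoopA cs d g a cnt).2.1 =
      cs.foldl (fun g c => match groupOf c with
        | some k => PySem.Set.add g k
        | none => g) g := by
  induction cs with
  | nil => intro d g a cnt; rfl
  | cons c rest ih =>
    intro d g a cnt
    simp only [solLoopA, List.foldl_cons, chainA]
    cases h : groupOf c <;> simp only [h] <;> exact ih _ _ _ _

theorem solLoopA_answer_mem (cs : List Char) (x : Int) :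
    ∀ d g a cnt, x ∈ (solLoopA cs d g a cnt).2.2 ↔
      x ∈ a ∨ (x = 2 ∧ cs.any (fun c => groupOf c == none)) ∨ (x = 4 ∧ aRun cs cnt) := by
  induction cs with
  | nil => intro d g a cnt; simp [solLoopA, aRun]
  | cons c rest ih =>
    intro d g a cnt
    simp only [solLoopA, chainA, aRun, List.any_cons]
    cases h : groupOf c with
    | none =>
      split_ifs with hnext hge hge <;>
        rw [ih] <;>
        simp only [PySem.Set.mem_add, h, beq_self_eq_true, Bool.true_or, decide_eq_true_eq,
          Bool.or_eq_true, and_true] <;>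
        first
          | tauto
          | (simp only [show ((3:ℤ) ≤ cnt + 1) ↔ True from iff_of_true hge trivial, true_or,
              and_true]; tauto)
          | (simp only [show ((3:ℤ) ≤ cnt + 1) ↔ False from iff_of_false hge (by omega),
              false_or]; tauto)
          | (simp only [show ((3:ℤ) ≤ 0) ↔ False from by omega, false_or]; tauto)
    | some k =>
      split_ifs with hnext hge hge <;>
        rw [ih] <;>
        simp only [PySem.Set.mem_add,
          show ((groupOf c == none) = false) from by simp [h], Bool.false_or] <;>
        first
          | tauto
          | (simp only [show ((3:ℤ) ≤ cnt + 1) ↔ True from iff_of_true hge trivial,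
              decide_eq_true_eq, ge_iff_le, Bool.or_eq_true, true_or, and_true]; tauto)
          | (simp only [decide_eq_true_eq, ge_iff_le, Bool.or_eq_true,
              show ((3:ℤ) ≤ cnt + 1) ↔ False from ⟨fun hh => absurd hh hge, False.elim⟩,
              false_or]; tauto)
          | (simp only [decide_eq_true_eq, ge_iff_le, Bool.or_eq_true,
              show ((3:ℤ) ≤ 0) ↔ False from by omega, false_or]; tauto)

theorem solLoopA_answer_nodup (cs : List Char) :
    ∀ d g a cnt, a.Nodup → ((solLoopA cs d g a cnt).2.2 : List Int).Nodup := by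
  induction cs with
  | nil => intro d g a cnt h; exact h
  | cons c rest ih =>
    intro d g a cnt h
    simp only [solLoopA, chainA]
    cases hg : groupOf c <;>
      simp only [] <;>
      split_ifs <;>
      exact ih _ _ _ _ (by
        first
          | exact h
          | exact PySem.Set.nodup_add _ _ h
          | exact PySem.Set.nodup_add _ _ (PySem.Set.nodup_add _ _ h))

theorem aRun_cons_eq (c d : Char) (rest : List Char) (cnt : Int) (h : (c == d) = true) :
    aRun (c :: d :: rest) cnt = (decide (cnt + 1 ≥ 3) || aRun (d :: rest) (cnt + 1)) := by
  rw [aRun]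
  simp [h]

theorem aRun_cons_ne (c d : Char) (rest : List Char) (cnt : Int) (h : (c == d) = false) :
    aRun (c :: d :: rest) cnt = aRun (d :: rest) 0 := by
  rw [aRun]
  simp [h]

-- A's running count triggers inside the first run of equal characters iff that run is long
-- enough, and then restarts at 0 behind it — the bridge to B's run-length scan.
theorem aRun_block (cs : List Char) : ∀ (c : Char) (cnt : Int), 0 ≤ cnt →
    aRun (c :: cs) cnt =
      ((decide (1 ≤ (cs.takeWhile (· == c)).length) &&
        decide (cnt + (cs.takeWhile (· == c)).length ≥ 3)) ||
       aRun (cs.drop (cs.takeWhile (· == c)).length) 0) := by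
  induction cs with
  | nil => intro c cnt h; simp [aRun]
  | cons d cs' ih =>
    intro c cnt h
    by_cases hdc : d = c
    · subst hdc
      have htw : (d :: cs').takeWhile (· == d) = d :: cs'.takeWhile (· == d) := by
        simp [List.takeWhile]
      rw [htw, aRun_cons_eq d d cs' cnt (by simp)]
      rw [ih d (cnt + 1) (by omega)]
      simp only [List.length_cons, List.drop_succ_cons]
      rw [Bool.eq_iff_iff]
      cases hrun : aRun (List.drop (List.takeWhile (fun x => x == d) cs').length cs') 0 <;>
        simp only [hrun, Bool.or_true, Bool.or_false, Bool.or_eq_true, Bool.and_eq_true,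
          decide_eq_true_eq] <;>
        (try push_cast) <;>
        (try simp only [true_and, and_true, false_or, or_false]) <;>
        omega
    · have hne : (d == c) = false := by simp [hdc]
      have hne' : (c == d) = false := by simp; exact fun e => hdc e.symm
      have htw : (d :: cs').takeWhile (· == c) = [] := by
        simp [List.takeWhile, hne]
      rw [htw, aRun_cons_ne c d cs' cnt hne']
      simp

theorem runScanB_acc (cs : List Char) : ∀ b : Bool, runScanB cs b = (b || runScanB cs false) := by
  induction hn : cs.length using Nat.strong_induction_on generalizing cs with
  | _ n ih =>
    intro b
    match cs with
    | [] => simp [runScanB]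
    | c :: rest =>
      rw [runScanB, runScanB]
      have hlt : (rest.drop (rest.takeWhile (· == c)).length).length < n := by
        have : (List.drop (rest.takeWhile (· == c)).length rest).length
            = rest.length - (rest.takeWhile (· == c)).length := List.length_drop
        simp only [← hn, List.length_cons]
        omega
      rw [ih _ hlt _ rfl (b || decide (1 + (rest.takeWhile (· == c)).length ≥ 4)),
          ih _ hlt _ rfl (false || decide (1 + (rest.takeWhile (· == c)).length ≥ 4))]
      cases b <;> simp

theorem aRun_eq_runScanB (cs : List Char) : aRun cs 0 = runScanB cs false := by
  induction hn : cs.length using Nat.strong_induction_on generalizing cs with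
  | _ n ih =>
    match cs with
    | [] => simp [aRun, runScanB]
    | c :: rest =>
      rw [aRun_block rest c 0 le_rfl, runScanB, runScanB_acc]
      have hlt : (rest.drop (rest.takeWhile (· == c)).length).length < n := by
        have : (List.drop (rest.takeWhile (· == c)).length rest).length
            = rest.length - (rest.takeWhile (· == c)).length := List.length_drop
        simp only [← hn, List.length_cons]
        omega
      rw [ih _ hlt _ rfl]
      rw [Bool.eq_iff_iff]
      cases hrun : runScanB (rest.drop (rest.takeWhile (· == c)).length) false <;>
        simp only [hrun, Bool.or_true, Bool.or_false, Bool.false_or, Bool.or_eq_true,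
          Bool.and_eq_true, decide_eq_true_eq] <;>
        (try push_cast) <;>
        (try simp only [true_and, and_true, false_or, or_false]) <;>
        omega

-- A's checkGroup accumulation is B's set of the filterMapped groups.
theorem groupsFold (cs : List Char) :
    ∀ g : PySem.Set Int, cs.foldl (fun g c => match groupOf c with
        | some k => PySem.Set.add g k
        | none => g) g = (cs.filterMap groupOf).foldl PySem.Set.add g := by
  induction cs with
  | nil => intro g; rfl
  | cons c rest ih =>
    intro g
    cases h : groupOf c <;> simp [List.filterMap_cons, h, ih]

-- A's final loop over checkNum.values, as a membership fact.
theorem fold5_mem (vs : List Int) (x : Int) :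
    ∀ a : PySem.Set Int, x ∈ vs.foldl (fun a v => if v ≥ 5 then PySem.Set.add a 5 else a) a ↔
      x ∈ a ∨ (x = 5 ∧ vs.any (fun v => v ≥ 5)) := by
  induction vs with
  | nil => intro a; simp
  | cons v rest ih =>
    intro a
    simp only [List.foldl_cons, List.any_cons, ih]
    split_ifs with h <;>
      (try simp only [PySem.Set.mem_add, show (decide (v ≥ 5) = true) ↔ (5 ≤ v) from by simp,
        Bool.or_eq_true]) <;>
      first
        | (simp only [show ((5:ℤ) ≤ v) ↔ True from iff_of_true h trivial, true_or, and_true]; (try tauto))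
        | (simp only [show ((5:ℤ) ≤ v) ↔ False from iff_of_false h not_false, false_or]; (try tauto))

theorem fold5_nodup (vs : List Int) :
    ∀ a : PySem.Set Int, (a : List Int).Nodup →
      (vs.foldl (fun a v => if v ≥ 5 then PySem.Set.add a 5 else a) a : List Int).Nodup := by
  induction vs with
  | nil => intro a h; exact h
  | cons v rest ih =>
    intro a h
    simp only [List.foldl_cons]
    split_ifs <;> exact ih _ (by first | exact h | exact PySem.Set.nodup_add _ _ h)

theorem mem_addIf (q : Prop) [Decidable q] (s : PySem.Set Int) (k x : Int) :
    (x ∈ (if q then PySem.Set.add s k else s)) ↔ (x ∈ s ∨ (q ∧ x = k)) := by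
  split_ifs with h <;> simp [PySem.Set.mem_add, h] <;> (try tauto)

theorem nodup_addIf (q : Prop) [Decidable q] (s : PySem.Set Int) (k : Int)
    (h : (s : List Int).Nodup) : ((if q then PySem.Set.add s k else s : PySem.Set Int) : List Int).Nodup := by
  split_ifs
  · exact PySem.Set.nodup_add _ _ h
  · exact h

theorem mem_appendIf (q : Prop) [Decidable q] (l : List Int) (k x : Int) :
    (x ∈ (if q then l ++ [k] else l)) ↔ (x ∈ l ∨ (q ∧ x = k)) := by
  split_ifs with h <;> simp [h]

theorem pairwise_appendIf (q : Prop) [Decidable q] (l : List Int) (k : Int)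
    (hl : l.Pairwise (· < ·)) (hb : ∀ y ∈ l, y < k) :
    (if q then l ++ [k] else l).Pairwise (· < ·) := by
  split_ifs
  · exact List.pairwise_append.mpr ⟨hl, List.pairwise_singleton _ _, by simpa using hb⟩
  · exact hl

theorem bound_appendIf (q : Prop) [Decidable q] (l : List Int) (k m : Int)
    (hb : ∀ y ∈ l, y ≤ m) (hk : k ≤ m) : ∀ y ∈ (if q then l ++ [k] else l), y ≤ m := by
  intro y hy
  rw [mem_appendIf] at hy
  rcases hy with hy | ⟨-, hy⟩
  · exact hb y hy
  · omega

-- B's codes list is built in strictly increasing order.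
theorem codes_pairwise (q1 q2 q3 q4 q5 : Prop)
    [Decidable q1] [Decidable q2] [Decidable q3] [Decidable q4] [Decidable q5] :
    (if q5 then (if q4 then (if q3 then (if q2 then (if q1 then ([] : List Int) ++ [1] else []) ++ [2]
        else (if q1 then ([] : List Int) ++ [1] else [])) ++ [3]
        else (if q2 then (if q1 then ([] : List Int) ++ [1] else []) ++ [2]
        else (if q1 then ([] : List Int) ++ [1] else []))) ++ [4]
        else (if q3 then (if q2 then (if q1 then ([] : List Int) ++ [1] else []) ++ [2]
        else (if q1 then ([] : List Int) ++ [1] else [])) ++ [3]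
        else (if q2 then (if q1 then ([] : List Int) ++ [1] else []) ++ [2]
        else (if q1 then ([] : List Int) ++ [1] else [])))) ++ [5]
        else (if q4 then (if q3 then (if q2 then (if q1 then ([] : List Int) ++ [1] else []) ++ [2]
        else (if q1 then ([] : List Int) ++ [1] else [])) ++ [3]
        else (if q2 then (if q1 then ([] : List Int) ++ [1] else []) ++ [2]
        else (if q1 then ([] : List Int) ++ [1] else []))) ++ [4]
        else (if q3 then (if q2 then (if q1 then ([] : List Int) ++ [1] else []) ++ [2]
        else (if q1 then ([] : List Int) ++ [1] else [])) ++ [3]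
        else (if q2 then (if q1 then ([] : List Int) ++ [1] else []) ++ [2]
        else (if q1 then ([] : List Int) ++ [1] else []))))).Pairwise (· < ·) := by
  have h1 := pairwise_appendIf q1 [] 1 List.Pairwise.nil (by simp)
  have hb1 : ∀ y ∈ (if q1 then ([] : List Int) ++ [1] else []), y ≤ 1 :=
    bound_appendIf q1 [] 1 1 (by simp) le_rfl
  have h2 := pairwise_appendIf q2 _ 2 h1 (fun y hy => by have := hb1 y hy; omega)
  have hb2 := bound_appendIf q2 _ 2 2 (fun y hy => by have := hb1 y hy; omega) le_rfl
  have h3 := pairwise_appendIf q3 _ 3 h2 (fun y hy => by have := hb2 y hy; omega)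
  have hb3 := bound_appendIf q3 _ 3 3 (fun y hy => by have := hb2 y hy; omega) le_rfl
  have h4 := pairwise_appendIf q4 _ 4 h3 (fun y hy => by have := hb3 y hy; omega)
  have hb4 := bound_appendIf q4 _ 4 4 (fun y hy => by have := hb3 y hy; omega) le_rfl
  exact pairwise_appendIf q5 _ 5 h4 (fun y hy => by have := hb4 y hy; omega)

-- sorted(list(answer)) against an already-sorted codes list with the same members.
theorem assemble (S codes : List Int) (hnd : S.Nodup)
    (hmem : ∀ x, x ∈ S ↔ x ∈ codes) (hp : codes.Pairwise (· < ·)) :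
    (if PySem.Set.len S = 0 then [0] else PySem.List.sorted S (fun x => x)) =
    (if codes = [] then [0] else codes) := by
  have hnd2 : codes.Nodup := hp.nodup
  have hperm : codes.Perm S :=
    (List.perm_ext_iff_of_nodup hnd2 hnd).mpr (fun a => (hmem a).symm)
  have hlen : S.length = codes.length := hperm.length_eq.symm
  have hlen' : PySem.Set.len S = (S.length : Int) := rfl
  by_cases h0 : codes = []
  · subst h0
    have hS : S = [] := List.length_eq_zero_iff.mp (by simpa using hlen)
    subst hS
    simp [PySem.Set.len]
  · have hne : ¬ (PySem.Set.len S = 0) := by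
      rw [hlen']
      intro hS
      have : S.length = 0 := by exact_mod_cast hS
      rw [this] at hlen
      exact h0 (List.length_eq_zero_iff.mp hlen.symm)
    rw [if_neg hne, if_neg h0]
    exact PySem.List.sorted_eq_of_perm_of_pairwise_lt S codes (fun x => x) hperm hp

-- ===== VERDICT (by name: the statement is the Claim_ definition above) =====
theorem solution_spec : Claim_equal_solution := by
  intro inp_str _
  unfold Spec_solution
  simp only [solution, solution_alt]
  -- name the five flags
  set cs := inp_str.toList with hcs
  -- rewrite A's three loop results
  rw [solLoopA_counts, solLoopA_groups, ← PySem.Dict.counter_eq_foldl, groupsFold]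
  rw [show (List.foldl PySem.Set.add PySem.Set.empty (List.filterMap groupOf cs))
      = PySem.Set.ofList (cs.filterMap groupOf) from (PySem.Set.ofList_eq_foldl _).symm]
  -- the codes list, step by step
  apply assemble
  · -- Nodup of A's answer set
    apply fold5_nodup
    apply nodup_addIf
    exact solLoopA_answer_nodup cs PySem.Dict.empty PySem.Set.empty _ 0
      (by split_ifs <;> simp [PySem.Set.add, PySem.Set.empty, PySem.Set.contains])
  · -- same membership on both sides
    intro x
    rw [fold5_mem, mem_addIf, solLoopA_answer_mem, mem_addIf, aRun_eq_runScanB,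
        mem_appendIf, mem_appendIf, mem_appendIf, mem_appendIf, mem_appendIf]
    simp only [PySem.Set.empty, List.not_mem_nil, false_or, or_false]
    tauto
  · -- codes is strictly sorted
    exact codes_pairwise _ _ _ _ _
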